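-- pv_equiv track=rewrite | github.com/nbeck1144/ScrabbleEngine | engine.py | get_words_from_rack
-- ===== SOURCE A (Python) =====
-- def get_words_from_rack(rack_tiles, word_set):
--     """
--     Given tiles and the list of words, provide a list of possible plays
--     """
--     results = set()
--
--     def search(remaining_rack, current_word, tiles_used):
--
--         if len(current_word) >= 2 and current_word in word_set:
--             results.add((current_word, tuple(tiles_used)))
--         if not remaining_rack:
--             return
--
--         seen = set()
--         for i, tile in enumerate(remaining_rack):
--             if tile in seen:
--                 continue
--             seen.add(tile)
--             next_rack = remaining_rack[:i] + remaining_rack[i+1:]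
--             if tile == '?':
--                 # try blank as each letter
--                 for ch in 'ABCDEFGHIJKLMNOPQRSTUVWXYZ':
--                     search(next_rack, current_word + ch, tiles_used + [('?', ch)])
--             else:
--                 search(next_rack, current_word + tile, tiles_used + [(tile, tile)])
--
--     search(rack_tiles, '', [])
--
--     return list(results)
-- ===== SOURCE B (Python) =====
-- def get_words_from_rack(rack_tiles, word_set):
--     """
--     Given tiles and the list of words, provide a list of possible plays
--     """
--
--     def spellings(suffix, remaining):
--         """Yield every tile sequence drawn from `remaining` whose letters
--         concatenate to exactly `suffix`, as (tile, letter-string) pairs."""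
--         if not suffix:
--             yield ()
--         for tile in dict.fromkeys(remaining):
--             rest = list(remaining)
--             rest.remove(tile)
--             if tile == '?':
--                 if suffix and suffix[0] in 'ABCDEFGHIJKLMNOPQRSTUVWXYZ':
--                     for tail in spellings(suffix[1:], rest):
--                         yield (('?', suffix[0]),) + tail
--             elif suffix.startswith(tile):
--                 for tail in spellings(suffix[len(tile):], rest):
--                     yield ((tile, tile),) + tail
--
--     results = set()
--     for word in word_set:
--         if len(word) >= 2:
--             for used in spellings(word, list(rack_tiles)):
--                 results.add((word, used))
--     return sorted(results)
-- ===== Notes on version B (the rewrite author's own statement) =====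
-- stated objective: alternative
-- what changed: A DFS-enumerates all rack arrangements (each blank expanded to all 26 letters) and collects every dictionary hit; B instead iterates the dictionary words and, for each word, generates the rack-tile sequences that spell it, emitting the result set in sorted order (A's list(results) order is hash-set iteration order, compared as a set).
import Mathlib
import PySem

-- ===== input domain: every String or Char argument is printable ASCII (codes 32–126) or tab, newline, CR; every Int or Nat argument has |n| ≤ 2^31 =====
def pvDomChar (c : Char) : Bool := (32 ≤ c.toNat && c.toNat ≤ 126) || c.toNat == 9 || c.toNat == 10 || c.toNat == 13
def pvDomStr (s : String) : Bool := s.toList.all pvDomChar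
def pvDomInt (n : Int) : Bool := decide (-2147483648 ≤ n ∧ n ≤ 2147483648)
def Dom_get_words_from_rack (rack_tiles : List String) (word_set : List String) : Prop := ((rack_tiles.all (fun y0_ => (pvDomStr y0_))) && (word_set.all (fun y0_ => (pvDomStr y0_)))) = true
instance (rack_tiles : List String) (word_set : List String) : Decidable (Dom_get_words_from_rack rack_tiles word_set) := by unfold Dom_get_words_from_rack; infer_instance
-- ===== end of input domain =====

-- B replaces A's DFS over all rack arrangements (each blank tried as all 26 letters) by iterating the
-- dictionary words and enumerating, per word, the tile sequences that spell it.
-- Both Pythons collect results into a Python SET; A returns `list(results)`, iterating a hash set,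
-- whose order is not a behaviour (outputs are compared as sets), so both ports emit the result set
-- in Python's sorted order (B's Python returns sorted(results)).

-- ===== PORT A =====
def pvUpperA : List Char := "ABCDEFGHIJKLMNOPQRSTUVWXYZ".toList

-- Python's default comparison on the result tuples, as a sort key: lexicographic on the pair,
-- lexicographic on the list of pairs (this IS sorted(results)'s order).
def pvKey (r : String × List (String × String)) : Lex (String × List (Lex (String × String))) :=
  toLex (r.1, r.2.map (fun p => toLex p))

-- the `for i, tile in enumerate(remaining_rack)` loop of `search`: `done` = rack[:i], `todo` the rest,
-- so rack[:i] + rack[i+1:] = done ++ rest; `f` is the recursive `search` one tile deeper.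
def pvLoopA
    (f : List String → String → List (String × String) →
         PySem.Set (String × List (String × String)) → PySem.Set (String × List (String × String)))
    (cur : String) (used : List (String × String)) :
    List String → List String → PySem.Set String →
    PySem.Set (String × List (String × String)) → PySem.Set (String × List (String × String))
  | _, [], _, res => res
  | done, tile :: rest, seen, res =>
    if PySem.Set.contains seen tile then
      pvLoopA f cur used (done ++ [tile]) rest seen res
    else
      let seen' := PySem.Set.add seen tile
      let next := done ++ rest
      let res' :=
        if tile = "?" then
          pvUpperA.foldl (fun r ch => f next (cur.push ch) (used ++ [("?", String.singleton ch)]) r) res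
        else
          f next (cur ++ tile) (used ++ [(tile, tile)]) res
      pvLoopA f cur used (done ++ [tile]) rest seen' res'

def pvSearchA (word_set : List String) :
    Nat → List String → String → List (String × String) →
    PySem.Set (String × List (String × String)) → PySem.Set (String × List (String × String))
  | 0, _, _, _, res => res  -- fuel guard, never reached: the rack shrinks at every recursive call
  | fuel + 1, rack, cur, used, res =>
    let res1 := if 2 ≤ PySem.Str.len cur ∧ cur ∈ word_set then PySem.Set.add res (cur, used) else res
    if rack.isEmpty then res1
    else pvLoopA (pvSearchA word_set fuel) cur used [] rack PySem.Set.empty res1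

def get_words_from_rack (rack_tiles : List String) (word_set : List String) :
    List (String × (List (String × String))) :=
  PySem.List.sorted (pvSearchA word_set (rack_tiles.length + 1) rack_tiles "" [] PySem.Set.empty) pvKey

-- ===== PORT B =====
def pvUpperB : List Char := "ABCDEFGHIJKLMNOPQRSTUVWXYZ".toList

-- `spellings(suffix, remaining)` of Source B, as the list of yielded sequences, in yield order;
-- `dict.fromkeys(remaining)` = PySem.List.dedup, `rest.remove(tile)` = erase of the first occurrence,
-- `suffix.startswith(tile)` = take-prefix comparison on the char lists.
def pvSpellB : Nat → List Char → List String → List (List (String × String))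
  | 0, _, _ => []  -- fuel guard, never reached: `remaining` shrinks at every recursive call
  | fuel + 1, suffix, remaining =>
    (if suffix = [] then [[]] else []) ++
    (PySem.List.dedup remaining).flatMap (fun tile =>
      let rest := remaining.erase tile
      if tile = "?" then
        match suffix with
        | [] => []
        | c :: cs =>
          if c ∈ pvUpperB then
            (pvSpellB fuel cs rest).map (fun tail => ("?", String.singleton c) :: tail)
          else []
      else
        if suffix.take tile.toList.length = tile.toList then
          (pvSpellB fuel (suffix.drop tile.toList.length) rest).map (fun tail => (tile, tile) :: tail)
        else [])

def get_words_from_rack_alt (rack_tiles : List String) (word_set : List String) :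
    List (String × (List (String × String))) :=
  let results :=
    word_set.foldl
      (fun res word =>
        if 2 ≤ PySem.Str.len word then
          (pvSpellB (rack_tiles.length + 1) word.toList rack_tiles).foldl
            (fun r used => PySem.Set.add r (word, used)) res
        else res)
      PySem.Set.empty
  PySem.List.sorted results pvKey

-- ===== PRECONDITION & SPEC =====
def Spec_get_words_from_rack (rack_tiles : List String) (word_set : List String) (out : List (String × (List (String × String)))) : Prop := out = get_words_from_rack_alt rack_tiles word_set
instance (rack_tiles : List String) (word_set : List String) (out : List (String × (List (String × String)))) : Decidable (Spec_get_words_from_rack rack_tiles word_set out) := by unfold Spec_get_words_from_rack; infer_instance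

-- ===== CLAIM (what is proved, stated in full; the proofs are below) =====
def Claim_equal_get_words_from_rack : Prop := ∀ (rack_tiles : List String) (word_set : List String), Dom_get_words_from_rack rack_tiles word_set → Spec_get_words_from_rack rack_tiles word_set (get_words_from_rack rack_tiles word_set)

-- ===== LEMMAS AND PROOFS =====

theorem mem_foldl_iff {α β : Type} (g : β → List α → List α) (Q : β → α → Prop)
    (l : List β)
    (h : ∀ b ∈ l, ∀ r x, x ∈ g b r ↔ x ∈ r ∨ Q b x) :
    ∀ (r : List α) (x : α), x ∈ l.foldl (fun r b => g b r) r ↔ x ∈ r ∨ ∃ b ∈ l, Q b x := by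
  induction l with
  | nil => simp
  | cons b l ih =>
    intro r x
    simp only [List.foldl_cons]
    rw [ih (fun b hb => h b (List.mem_cons_of_mem _ hb)), h b (List.mem_cons_self ..)]
    simp only [List.mem_cons]
    constructor
    · rintro ((h1 | h2) | ⟨b', hb', hq⟩)
      · exact Or.inl h1
      · exact Or.inr ⟨b, Or.inl rfl, h2⟩
      · exact Or.inr ⟨b', Or.inr hb', hq⟩
    · rintro (h1 | ⟨b', (rfl | hb'), hq⟩)
      · exact Or.inl (Or.inl h1)
      · exact Or.inl (Or.inr hq)
      · exact Or.inr ⟨b', hb', hq⟩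

theorem erase_cons_ne (tile t : String) (rest : List String) (h : t ≠ tile) :
    (tile :: rest).erase t = tile :: rest.erase t :=
  List.erase_cons_tail (by simp [Ne.symm h])

theorem loopA_mem
    {f : List String → String → List (String × String) →
         PySem.Set (String × List (String × String)) → PySem.Set (String × List (String × String))}
    (QF : List String → String → List (String × String) → (String × List (String × String)) → Prop)
    (cur : String) (used : List (String × String)) (N : Nat)
    (hf : ∀ next cur' used' r x, next.length < N → (x ∈ f next cur' used' r ↔ x ∈ r ∨ QF next cur' used' x)) :
    ∀ (todo done : List String) (seen : PySem.Set String) res x,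
      done.length + todo.length ≤ N →
      (x ∈ pvLoopA f cur used done todo seen res ↔
        x ∈ res ∨ ∃ tile, tile ∈ todo ∧ tile ∉ seen ∧
          (if tile = "?" then
             ∃ ch ∈ pvUpperA, QF (done ++ todo.erase tile) (cur.push ch) (used ++ [("?", String.singleton ch)]) x
           else QF (done ++ todo.erase tile) (cur ++ tile) (used ++ [(tile, tile)]) x)) := by
  intro todo
  induction todo with
  | nil => intro done seen res x hN; simp [pvLoopA]
  | cons tile rest ih =>
    intro done seen res x hN
    rw [pvLoopA]
    by_cases hseen : PySem.Set.contains seen tile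
    · rw [if_pos hseen, ih _ _ _ _ (by simp at hN ⊢; omega)]
      have hmem : tile ∈ seen := (PySem.Set.contains_iff ..).mp hseen
      constructor
      · rintro (h1 | ⟨t, ht, hns, hq⟩)
        · exact Or.inl h1
        · have htile : t ≠ tile := fun e => hns (e ▸ hmem)
          refine Or.inr ⟨t, List.mem_cons_of_mem _ ht, hns, ?_⟩
          have e : done ++ [tile] ++ rest.erase t = done ++ (tile :: rest).erase t := by
            rw [erase_cons_ne tile t rest htile]; simp
          rw [e] at hq; exact hq
      · rintro (h1 | ⟨t, ht, hns, hq⟩)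
        · exact Or.inl h1
        · have htile : t ≠ tile := fun e => hns (e ▸ hmem)
          rcases List.mem_cons.mp ht with e | ht'
          · exact absurd e htile
          · refine Or.inr ⟨t, ht', hns, ?_⟩
            have e : done ++ [tile] ++ rest.erase t = done ++ (tile :: rest).erase t := by
              rw [erase_cons_ne tile t rest htile]; simp
            rw [← e] at hq; exact hq
    · rw [if_neg hseen]
      have hns : tile ∉ seen := fun h => hseen ((PySem.Set.contains_iff ..).mpr h)
      have hlen : (done ++ rest).length < N := by simp at hN ⊢; omega
      have hres' : ∀ res x, x ∈ (if tile = "?" then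
            pvUpperA.foldl (fun r ch => f (done ++ rest) (cur.push ch) (used ++ [("?", String.singleton ch)]) r) res
          else f (done ++ rest) (cur ++ tile) (used ++ [(tile, tile)]) res) ↔
          x ∈ res ∨ (if tile = "?" then
             ∃ ch ∈ pvUpperA, QF (done ++ rest) (cur.push ch) (used ++ [("?", String.singleton ch)]) x
           else QF (done ++ rest) (cur ++ tile) (used ++ [(tile, tile)]) x) := by
        intro res x
        by_cases ht : tile = "?"
        · simp only [if_pos ht]
          exact mem_foldl_iff _ (fun ch x => QF (done ++ rest) (cur.push ch) (used ++ [("?", String.singleton ch)]) x)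
            _ (fun ch _ r x => hf _ _ _ r x hlen) res x
        · simp only [if_neg ht]
          exact hf _ _ _ res x hlen
      rw [ih _ _ _ _ (by simp at hN ⊢; omega), hres']
      have herase : (tile :: rest).erase tile = rest := by simp
      constructor
      · rintro ((h1 | hbr) | ⟨t, ht, hns2, hq⟩)
        · exact Or.inl h1
        · refine Or.inr ⟨tile, List.mem_cons_self .., hns, ?_⟩
          rw [herase]
          exact hbr
        · have htile : t ≠ tile := fun e => hns2 (by
            rw [e]; exact (PySem.Set.mem_add seen tile tile).mpr (Or.inr rfl))
          have hns3 : t ∉ seen := fun h => hns2 ((PySem.Set.mem_add seen tile t).mpr (Or.inl h))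
          refine Or.inr ⟨t, List.mem_cons_of_mem _ ht, hns3, ?_⟩
          have e : done ++ [tile] ++ rest.erase t = done ++ (tile :: rest).erase t := by
            rw [erase_cons_ne tile t rest htile]; simp
          rw [e] at hq; exact hq
      · rintro (h1 | ⟨t, ht, hns2, hq⟩)
        · exact Or.inl (Or.inl h1)
        · by_cases htile : t = tile
          · subst htile
            rw [herase] at hq
            exact Or.inl (Or.inr hq)
          · rcases List.mem_cons.mp ht with e | ht'
            · exact absurd e htile
            · refine Or.inr ⟨t, ht', fun h => ?_, ?_⟩
              · rcases (PySem.Set.mem_add seen tile t).mp h with h2 | h2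
                · exact hns2 h2
                · exact htile h2
              · have e : done ++ [tile] ++ rest.erase t = done ++ (tile :: rest).erase t := by
                  rw [erase_cons_ne tile t rest htile]; simp
                rw [← e] at hq; exact hq

theorem nodup_foldl {α β : Type} (g : β → List α → List α)
    (l : List β) (h : ∀ b ∈ l, ∀ r, r.Nodup → (g b r).Nodup) :
    ∀ r : List α, r.Nodup → (l.foldl (fun r b => g b r) r).Nodup := by
  induction l with
  | nil => simp
  | cons b l ih =>
    intro r hr
    exact ih (fun b hb => h b (List.mem_cons_of_mem _ hb)) _ (h b (List.mem_cons_self ..) r hr)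

theorem split_eq_append_iff {α : Type} (d : List α) (a b : List α) :
    d = a ++ b ↔ (d.take a.length = a ∧ d.drop a.length = b) := by
  constructor
  · rintro rfl
    exact ⟨List.take_left, List.drop_left⟩
  · rintro ⟨h1, h2⟩
    rw [← List.take_append_drop a.length d, h1, h2]

def picksOK : List String → List (String × String) → Prop
  | _, [] => True
  | rack, (t, s) :: rest =>
      (t = "?" ∧ (∃ ch ∈ pvUpperA, s = String.singleton ch) ∧ "?" ∈ rack ∧ picksOK (rack.erase "?") rest)
      ∨ (t ≠ "?" ∧ s = t ∧ t ∈ rack ∧ picksOK (rack.erase t) rest)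

def pconcat (picks : List (String × String)) : List Char :=
  (picks.map (fun p => p.2.toList)).flatten

theorem picksOK_nil_iff (picks : List (String × String)) : picksOK [] picks ↔ picks = [] := by
  cases picks with
  | nil => simp [picksOK]
  | cons p rest => cases p; simp [picksOK]

theorem strlen_iff (s : String) : 2 ≤ PySem.Str.len s ↔ 2 ≤ s.toList.length := by
  rw [PySem.Str.len_eq]; exact_mod_cast Iff.rfl

theorem mem_record_iff {α : Type} [BEq α] [LawfulBEq α] (c : Prop) [Decidable c]
    (res : PySem.Set α) (y x : α) :
    x ∈ (if c then PySem.Set.add res y else res) ↔ x ∈ res ∨ (c ∧ x = y) := by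
  split_ifs with hc
  · rw [PySem.Set.mem_add]; tauto
  · tauto

theorem searchA_mem (ws : List String) :
    ∀ (fuel : Nat) (rack : List String) (cur : String) (used : List (String × String)) res x,
      rack.length < fuel →
      (x ∈ pvSearchA ws fuel rack cur used res ↔
        x ∈ res ∨ (x.1 ∈ ws ∧ 2 ≤ x.1.toList.length ∧
          ∃ picks, picksOK rack picks ∧ x.2 = used ++ picks ∧ x.1.toList = cur.toList ++ pconcat picks)) := by
  intro fuel
  induction fuel with
  | zero => intro rack _ _ _ _ h; omega
  | succ fuel ih =>
    intro rack cur used res x h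
    rw [pvSearchA]
    have hbase : ∀ x, x ∈ (if 2 ≤ PySem.Str.len cur ∧ cur ∈ ws then PySem.Set.add res (cur, used) else res) ↔
        x ∈ res ∨ ((2 ≤ PySem.Str.len cur ∧ cur ∈ ws) ∧ x = (cur, used)) := fun x =>
      mem_record_iff _ res (cur, used) x
    have hbase' : ∀ x : String × List (String × String),
        ((2 ≤ PySem.Str.len cur ∧ cur ∈ ws) ∧ x = (cur, used)) ↔
        (x.1 ∈ ws ∧ 2 ≤ x.1.toList.length ∧ x.2 = used ∧ x.1.toList = cur.toList) := by
      intro x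
      rw [Prod.ext_iff, strlen_iff]
      constructor
      · rintro ⟨⟨h2, hw⟩, hx1, hx2⟩
        exact ⟨hx1 ▸ hw, hx1 ▸ h2, hx2, by rw [hx1]⟩
      · rintro ⟨hw, h2, hx2, hx1⟩
        have : x.1 = cur := String.toList_inj.mp hx1
        exact ⟨⟨this ▸ h2, this ▸ hw⟩, this, hx2⟩
    cases rack with
    | nil =>
      rw [if_pos (by simp), hbase, hbase']
      constructor
      · rintro (h1 | ⟨hw, h2, hx2, hx1⟩)
        · exact Or.inl h1
        · exact Or.inr ⟨hw, h2, [], trivial, by simpa using hx2, by simpa [pconcat] using hx1⟩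
      · rintro (h1 | ⟨hw, h2, picks, hok, hx2, hx1⟩)
        · exact Or.inl h1
        · rw [picksOK_nil_iff] at hok
          subst hok
          exact Or.inr ⟨hw, h2, by simpa using hx2, by simpa [pconcat] using hx1⟩
    | cons t0 r0 =>
      rw [if_neg (by simp)]
      rw [loopA_mem
        (fun next cur' used' x => x.1 ∈ ws ∧ 2 ≤ x.1.toList.length ∧
          ∃ picks, picksOK next picks ∧ x.2 = used' ++ picks ∧ x.1.toList = cur'.toList ++ pconcat picks)
        cur used fuel
        (fun next cur' used' r x hlen => ih next cur' used' r x hlen)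
        (t0 :: r0) [] PySem.Set.empty _ x (by simp at h ⊢; omega)]
      rw [hbase, hbase']
      constructor
      · rintro ((h1 | hb) | ⟨tile, htm, -, hq⟩)
        · exact Or.inl h1
        · obtain ⟨hw, h2, hx2, hx1⟩ := hb
          exact Or.inr ⟨hw, h2, [], trivial, by simpa using hx2, by simpa [pconcat] using hx1⟩
        · by_cases ht : tile = "?"
          · subst ht
            rw [if_pos rfl] at hq
            obtain ⟨ch, hch, hw, h2, picks, hok, hx2, hx1⟩ := hq
            refine Or.inr ⟨hw, h2, ("?", String.singleton ch) :: picks, ?_, ?_, ?_⟩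
            · exact Or.inl ⟨rfl, ⟨ch, hch, rfl⟩, htm, by simpa using hok⟩
            · simpa using hx2
            · simp [pconcat] at hx1 ⊢
              simpa [String.toList_push] using hx1
          · rw [if_neg ht] at hq
            obtain ⟨hw, h2, picks, hok, hx2, hx1⟩ := hq
            refine Or.inr ⟨hw, h2, (tile, tile) :: picks, ?_, ?_, ?_⟩
            · exact Or.inr ⟨ht, rfl, htm, by simpa using hok⟩
            · simpa using hx2
            · simp [pconcat] at hx1 ⊢
              simpa [String.toList_append] using hx1
      · rintro (h1 | ⟨hw, h2, picks, hok, hx2, hx1⟩)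
        · exact Or.inl (Or.inl h1)
        · cases picks with
          | nil =>
            refine Or.inl (Or.inr ⟨hw, h2, by simpa using hx2, by simpa [pconcat] using hx1⟩)
          | cons p rest =>
            obtain ⟨t, s⟩ := p
            rcases hok with ⟨ht, ⟨ch, hch, hs⟩, hm, hok'⟩ | ⟨ht, hs, hm, hok'⟩
            · subst ht; subst hs
              refine Or.inr ⟨"?", hm, by simp [PySem.Set.empty], ?_⟩
              rw [if_pos rfl]
              refine ⟨ch, hch, hw, h2, rest, by simpa using hok', by simpa using hx2, ?_⟩
              simp [pconcat] at hx1 ⊢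
              simpa [String.toList_push] using hx1
            · refine Or.inr ⟨t, hm, by simp [PySem.Set.empty], ?_⟩
              rw [if_neg ht]
              refine ⟨hw, h2, rest, by simpa using hok', by simpa [hs] using hx2, ?_⟩
              simp [pconcat, hs] at hx1 ⊢
              simpa [String.toList_append] using hx1

theorem pvUpperB_eq : pvUpperB = pvUpperA := rfl

theorem spellB_iff :
    ∀ (fuel : Nat) (suffix : List Char) (remaining : List String) (used : List (String × String)),
      remaining.length < fuel →
      (used ∈ pvSpellB fuel suffix remaining ↔ picksOK remaining used ∧ suffix = pconcat used) := by
  intro fuel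
  induction fuel with
  | zero => intro _ remaining _ h; omega
  | succ fuel ih =>
    intro suffix remaining used h
    rw [pvSpellB]
    rw [List.mem_append, List.mem_flatMap]
    have hbase : used ∈ (if suffix = [] then ([[]] : List (List (String × String))) else []) ↔
        suffix = [] ∧ used = [] := by
      split_ifs with hs <;> simp [hs]
    rw [hbase]
    have hlen : ∀ tile ∈ PySem.List.dedup remaining, (remaining.erase tile).length < fuel := by
      intro tile htile
      have hmem : tile ∈ remaining := (PySem.List.mem_dedup ..).mp htile
      have h1 : 0 < remaining.length := List.length_pos_of_mem hmem
      rw [List.length_erase_of_mem hmem]; omega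
    constructor
    · rintro (⟨hs, rfl⟩ | ⟨tile, htile, hq⟩)
      · exact ⟨trivial, by simp [hs, pconcat]⟩
      · have hmem : tile ∈ remaining := (PySem.List.mem_dedup ..).mp htile
        by_cases ht : tile = "?"
        · subst ht
          rw [if_pos rfl] at hq
          cases suffix with
          | nil => simp at hq
          | cons c cs =>
            dsimp only at hq
            by_cases hup : c ∈ pvUpperB
            · rw [if_pos hup, List.mem_map] at hq
              obtain ⟨tail, htail, rfl⟩ := hq
              obtain ⟨hok, hcs⟩ := (ih cs _ tail (hlen _ htile)).mp htail
              refine ⟨Or.inl ⟨rfl, ⟨c, pvUpperB_eq ▸ hup, rfl⟩, hmem, hok⟩, ?_⟩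
              simp [pconcat] at hcs ⊢
              exact hcs
            · rw [if_neg hup] at hq; simp at hq
        · rw [if_neg ht] at hq
          by_cases htake : suffix.take tile.toList.length = tile.toList
          · rw [if_pos htake, List.mem_map] at hq
            obtain ⟨tail, htail, rfl⟩ := hq
            obtain ⟨hok, hdrop⟩ := (ih _ _ tail (hlen _ htile)).mp htail
            refine ⟨Or.inr ⟨ht, rfl, hmem, hok⟩, ?_⟩
            rw [show pconcat ((tile, tile) :: tail) = tile.toList ++ pconcat tail from by simp [pconcat]]
            exact (split_eq_append_iff _ _ _).mpr ⟨htake, hdrop⟩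
          · rw [if_neg htake] at hq; simp at hq
    · rintro ⟨hok, hsp⟩
      cases used with
      | nil => exact Or.inl ⟨by simpa [pconcat] using hsp, rfl⟩
      | cons p rest =>
        obtain ⟨t, s⟩ := p
        rcases hok with ⟨ht, ⟨ch, hch, hs⟩, hm, hok'⟩ | ⟨ht, hs, hm, hok'⟩
        · subst ht; subst hs
          have hsp' : suffix = ch :: pconcat rest := by simpa [pconcat] using hsp
          refine Or.inr ⟨"?", (PySem.List.mem_dedup ..).mpr hm, ?_⟩
          rw [if_pos rfl, hsp']
          dsimp only
          rw [if_pos (pvUpperB_eq ▸ hch), List.mem_map]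
          exact ⟨rest, (ih _ _ rest (hlen _ ((PySem.List.mem_dedup ..).mpr hm))).mpr ⟨hok', rfl⟩, rfl⟩
        · have hsp' : suffix = t.toList ++ pconcat rest := by simpa [pconcat, hs] using hsp
          obtain ⟨htake, hdrop⟩ := (split_eq_append_iff _ _ _).mp hsp'
          refine Or.inr ⟨t, (PySem.List.mem_dedup ..).mpr hm, ?_⟩
          rw [if_neg ht, if_pos htake, List.mem_map]
          exact ⟨rest, (ih _ _ rest (hlen _ ((PySem.List.mem_dedup ..).mpr hm))).mpr ⟨hok', hdrop⟩, by rw [hs]⟩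

def Good (ws rack : List String) (x : String × List (String × String)) : Prop :=
  x.1 ∈ ws ∧ 2 ≤ x.1.toList.length ∧
    ∃ picks, picksOK rack picks ∧ x.2 = picks ∧ x.1.toList = pconcat picks

theorem loopA_nodup
    {f : List String → String → List (String × String) →
         PySem.Set (String × List (String × String)) → PySem.Set (String × List (String × String))}
    (hf : ∀ next cur' used' r, List.Nodup r → List.Nodup (f next cur' used' r))
    (cur : String) (used : List (String × String)) :
    ∀ (todo done : List String) (seen : PySem.Set String) res,
      List.Nodup res → List.Nodup (pvLoopA f cur used done todo seen res) := by
  intro todo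
  induction todo with
  | nil => intro done seen res h; simpa [pvLoopA] using h
  | cons tile rest ih =>
    intro done seen res h
    rw [pvLoopA]
    dsimp only
    split_ifs with hseen ht
    · exact ih _ _ _ h
    · exact ih _ _ _ (nodup_foldl _ pvUpperA (fun ch _ r hr => hf _ _ _ r hr) res h)
    · exact ih _ _ _ (hf _ _ _ res h)

theorem searchA_nodup (ws : List String) :
    ∀ (fuel : Nat) (rack : List String) (cur : String) (used : List (String × String)) res,
      List.Nodup res → List.Nodup (pvSearchA ws fuel rack cur used res) := by
  intro fuel
  induction fuel with
  | zero => intro rack cur used res h; simpa [pvSearchA] using h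
  | succ fuel ih =>
    intro rack cur used res h
    rw [pvSearchA]
    split_ifs with he hc hc2
    · exact PySem.Set.nodup_add _ _ h
    · exact h
    · exact loopA_nodup (fun next cur' used' r hr => ih next cur' used' r hr) cur used rack []
        _ _ (PySem.Set.nodup_add _ _ h)
    · exact loopA_nodup (fun next cur' used' r hr => ih next cur' used' r hr) cur used rack [] _ _ h

theorem pvKey_inj : Function.Injective pvKey := by
  intro a b h
  unfold pvKey at h
  have h' : (a.1, a.2.map (fun p => toLex p)) = (b.1, b.2.map (fun p => toLex p)) :=
    toLex.injective h
  obtain ⟨h1, h2⟩ := Prod.mk.injEq .. ▸ h'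
  have h3 : a.2 = b.2 :=
    List.map_injective_iff.mpr (fun x y e => toLex.injective e) h2
  exact Prod.ext h1 h3

theorem mem_A_iff_good (rack ws : List String) (x : String × List (String × String)) :
    x ∈ pvSearchA ws (rack.length + 1) rack "" [] PySem.Set.empty ↔ Good ws rack x := by
  rw [searchA_mem ws (rack.length + 1) rack "" [] PySem.Set.empty x (by omega)]
  unfold Good
  simp [PySem.Set.empty]

theorem mem_B_iff_good (rack ws : List String) (x : String × List (String × String)) :
    x ∈ ws.foldl
        (fun res word =>
          if 2 ≤ PySem.Str.len word then
            (pvSpellB (rack.length + 1) word.toList rack).foldl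
              (fun r used => PySem.Set.add r (word, used)) res
          else res)
        PySem.Set.empty ↔ Good ws rack x := by
  rw [mem_foldl_iff
    (fun word res =>
      if 2 ≤ PySem.Str.len word then
        (pvSpellB (rack.length + 1) word.toList rack).foldl
          (fun r used => PySem.Set.add r (word, used)) res
      else res)
    (fun word x => 2 ≤ PySem.Str.len word ∧
      ∃ used ∈ pvSpellB (rack.length + 1) word.toList rack, x = (word, used))
    ws ?h]
  case h =>
    intro word hword r y
    dsimp only
    split_ifs with hc
    · rw [mem_foldl_iff (fun used r => PySem.Set.add r (word, used)) (fun used y => y = (word, used))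
        _ (fun used _ r y => PySem.Set.mem_add r (word, used) y) r y]
      tauto
    · tauto
  unfold Good
  constructor
  · rintro (h1 | ⟨word, hmem, hlen, used, hused, rfl⟩)
    · simp [PySem.Set.empty] at h1
    · obtain ⟨hok, hsp⟩ := (spellB_iff (rack.length + 1) word.toList rack used (by omega)).mp hused
      exact ⟨hmem, (strlen_iff word).mp hlen, used, hok, rfl, hsp⟩
  · rintro ⟨hmem, hlen, picks, hok, hx2, hx1⟩
    refine Or.inr ⟨x.1, hmem, (strlen_iff x.1).mpr hlen, x.2, ?_, by rw [Prod.mk.eta]⟩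
    rw [hx2] at *
    exact (spellB_iff (rack.length + 1) x.1.toList rack picks (by omega)).mpr ⟨hok, hx1⟩

theorem final_eq (rack ws : List String) :
    get_words_from_rack rack ws = get_words_from_rack_alt rack ws := by
  unfold get_words_from_rack get_words_from_rack_alt
  refine PySem.List.sorted_eq_sorted_of_perm _ _ pvKey pvKey_inj ?_
  refine (List.perm_ext_iff_of_nodup ?_ ?_).mpr ?_
  · exact searchA_nodup ws _ rack "" [] _ List.nodup_nil
  · refine nodup_foldl _ ws (fun word _ r hr => ?_) _ List.nodup_nil
    dsimp only
    split_ifs with hc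
    · exact nodup_foldl _ _ (fun used _ r hr => PySem.Set.nodup_add r (word, used) hr) r hr
    · exact hr
  · intro a
    rw [mem_A_iff_good rack ws a, mem_B_iff_good rack ws a]

-- ===== VERDICT (by name: the statement is the Claim_ definition above) =====
theorem get_words_from_rack_spec : Claim_equal_get_words_from_rack := by
  intro rack_tiles word_set _
  unfold Spec_get_words_from_rack
  exact final_eq rack_tiles word_set
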